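-- pv_equiv track=rewrite | github.com/hoon99/Algorithm | 프로그래머스/2/42587. 프로세스/프로세스.py | solution
-- ===== SOURCE A (Python) =====
-- from collections import deque
--
-- def solution(priorities, location):
--
--     sequence = deque([i for i in range(len(priorities))])
--     queue = deque(priorities)
--     result = []
--
--     while queue:
--         process = queue.popleft()
--         for i in queue:
--             if i > process:
--                 queue.append(process)
--                 sequence.append(sequence.popleft())
--                 break
--         else:
--             result.append(sequence.popleft())
--
--     return result.index(location) + 1
-- ===== SOURCE B (Python) =====
-- def solution(priorities, location):
--     # Group indices by priority once, then emit each priority level in cyclic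
--     # order starting after the previously finished process -- no simulation.
--     groups = {}
--     for i, p in enumerate(priorities):
--         groups.setdefault(p, []).append(i)
--     rank = 0
--     start = 0
--     for p in sorted(groups, reverse=True):
--         idxs = groups[p]
--         seq = [i for i in idxs if i >= start] + [i for i in idxs if i < start]
--         for i in seq:
--             rank += 1
--             if i == location:
--                 return rank
--         start = seq[-1] + 1
-- ===== Notes on version B (the rewrite author's own statement) =====
-- stated objective: faster
-- what changed: B replaces the round-robin queue simulation by a closed-form construction: it groups indices by priority in one pass, then walks the distinct priorities in descending order, emitting each group in cyclic index order starting right after the previously completed process, so the completion rank of location is found without ever rotating a queue.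
import Mathlib
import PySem

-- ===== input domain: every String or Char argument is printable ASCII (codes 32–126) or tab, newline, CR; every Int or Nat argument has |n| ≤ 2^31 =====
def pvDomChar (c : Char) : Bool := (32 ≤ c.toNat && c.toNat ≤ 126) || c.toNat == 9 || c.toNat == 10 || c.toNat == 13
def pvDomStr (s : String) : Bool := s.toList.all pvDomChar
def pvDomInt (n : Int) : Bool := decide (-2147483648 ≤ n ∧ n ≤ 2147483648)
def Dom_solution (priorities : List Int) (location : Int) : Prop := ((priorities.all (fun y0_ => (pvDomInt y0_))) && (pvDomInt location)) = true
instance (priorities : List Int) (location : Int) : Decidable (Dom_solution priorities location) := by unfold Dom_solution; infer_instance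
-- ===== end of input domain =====

-- B replaces A's round-robin queue simulation by grouping indices per priority and
-- emitting the levels in descending priority in cyclic index order (objective: faster).


-- ===== PORT A =====
-- maximum of an Int list (0 on []); used only in the termination measure of the loop below
def pvMax (l : List Int) : Int :=
  match l with
  | [] => 0
  | x :: t => t.foldl max x

def pvMax_mem (l : List Int) (h : l ≠ []) : pvMax l ∈ l := by
  match l with
  | x :: t =>
    rcases PySem.List.foldl_max_mem t x with h1 | h1
    · simp [pvMax, h1]
    · simp [pvMax]; right; exact h1

def le_pvMax (l : List Int) (a : Int) (h : a ∈ l) : a ≤ pvMax l := by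
  match l with
  | x :: t =>
    rcases List.mem_cons.mp h with rfl | ha
    · exact (PySem.List.le_foldl_max t a).1
    · exact (PySem.List.le_foldl_max t x).2 a ha

def pvMax_eq (l : List Int) (m : Int) (hm : m ∈ l) (hub : ∀ y ∈ l, y ≤ m) : pvMax l = m :=
  le_antisymm (hub _ (pvMax_mem l (by rintro rfl; simp at hm))) (le_pvMax l m hm)

-- termination measure for A's while-loop: each rotation moves the first maximum one
-- step closer to the front, each completion shrinks the queue
def pvMeasure (q : List Int) : Nat :=
  q.length * (q.length + 1) + q.findIdx (fun x => decide (x = pvMax q))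

def pvMeasure_rotate (a : Int) (t : List Int)
    (h : t.any (fun i => decide (a < i)) = true) :
    pvMeasure (t ++ [a]) < pvMeasure (a :: t) := by
  obtain ⟨b, hb, hab⟩ := List.any_eq_true.mp h
  have hab : a < b := by simpa using hab
  have hbm : b ≤ pvMax (a :: t) := le_pvMax _ b (List.mem_cons_of_mem _ hb)
  have ham : a < pvMax (a :: t) := lt_of_lt_of_le hab hbm
  have hmt : pvMax (a :: t) ∈ t := by
    rcases List.mem_cons.mp (pvMax_mem (a :: t) (by simp)) with h1 | h1
    · omega
    · exact h1
  have hmax2 : pvMax (t ++ [a]) = pvMax (a :: t) := by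
    refine pvMax_eq _ _ (List.mem_append_left _ hmt) ?_
    intro y hy
    refine le_pvMax (a :: t) y ?_
    rcases List.mem_append.mp hy with h1 | h1
    · exact List.mem_cons_of_mem _ h1
    · simp at h1; simp [h1]
  have hfa : List.findIdx (fun x => decide (x = pvMax (a :: t))) t < t.length :=
    List.findIdx_lt_length.mpr ⟨pvMax (a :: t), hmt, by simp⟩
  have h1 : List.findIdx (fun x => decide (x = pvMax (t ++ [a]))) (t ++ [a])
      = List.findIdx (fun x => decide (x = pvMax (a :: t))) t := by
    rw [hmax2, List.findIdx_append, if_pos hfa]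
  have h2 : List.findIdx (fun x => decide (x = pvMax (a :: t))) (a :: t)
      = List.findIdx (fun x => decide (x = pvMax (a :: t))) t + 1 := by
    rw [List.findIdx_cons]
    have : (decide (a = pvMax (a :: t))) = false := by simp; omega
    simp [this]
  have hlen : (t ++ [a]).length = (a :: t).length := by simp
  unfold pvMeasure
  rw [h1, h2, hlen]
  omega

def pvMeasure_pop (a : Int) (t : List Int) : pvMeasure t < pvMeasure (a :: t) := by
  have h1 : t.findIdx (fun x => decide (x = pvMax t)) ≤ t.length := List.findIdx_le_length
  simp only [pvMeasure, List.length_cons]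
  nlinarith [List.findIdx_le_length (p := fun x => decide (x = pvMax (a :: t))) (xs := a :: t)]

-- the while-loop of A: queue of priorities, parallel deque of original indices, result list
-- ('popleft' on the parallel deque is 'drop 1/take 1': the two deques always have equal
-- length, so it is never empty when popped)
def solutionLoop (queue sequence result : List Int) : List Int :=
  match queue with
  | [] => result
  | process :: rest =>
    if rest.any (fun i => decide (process < i)) then
      solutionLoop (rest ++ [process]) (sequence.drop 1 ++ sequence.take 1) result
    else
      solutionLoop rest (sequence.drop 1) (result ++ sequence.take 1)
termination_by pvMeasure queue
decreasing_by
  · exact pvMeasure_rotate process rest (by assumption)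
  · exact pvMeasure_pop process rest

def solution (priorities : List Int) (location : Int) : Int :=
  let sequence := PySem.List.pyRange 0 (PySem.List.len priorities) 1
  let result := solutionLoop priorities sequence []
  match PySem.List.index? result location with
  | some j => (j : Int) + 1
  | none => 0   -- result.index raises ValueError: excluded by Pre_solution

-- ===== PORT B =====
-- the inner 'for i in seq: rank += 1; if i == location: return rank' loop:
-- .inl = early return with the final rank, .inr = fall through with the updated rank
def solutionAltInner (seq : List Int) (location : Int) (rank : Int) : Sum Int Int :=
  match seq with
  | [] => Sum.inr rank
  | i :: rest =>
    if i = location then Sum.inl (rank + 1) else solutionAltInner rest location (rank + 1)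

-- the outer 'for p in sorted(groups, reverse=True)' loop
def solutionAltLevels (groups : PySem.Dict Int (List Int)) (location : Int)
    (ps : List Int) (rank start : Int) : Int :=
  match ps with
  | [] => 0   -- Python falls off the function (None): unreachable under Pre_solution
  | p :: ps' =>
    let idxs := groups.getD p []
    let seq := idxs.filter (fun i => decide (start ≤ i)) ++ idxs.filter (fun i => decide (i < start))
    match solutionAltInner seq location rank with
    | Sum.inl r => r
    | Sum.inr rank' => solutionAltLevels groups location ps' rank' (PySem.List.pyGetD seq (-1) 0 + 1)

def solution_alt (priorities : List Int) (location : Int) : Int :=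
  let groups := (PySem.List.enumerate priorities 0).foldl
      (fun d q => d.modify q.2 [] (fun v => v ++ [q.1])) PySem.Dict.empty
  solutionAltLevels groups location (PySem.List.sorted groups.keys (fun x => x) true) 0 0

-- ===== PRECONDITION & SPEC =====
-- Pre_ excludes exactly the inputs on which A raises ValueError (location is not an
-- index of priorities, so result.index(location) fails); A returns on all other inputs.
def Pre_solution (priorities : List Int) (location : Int) : Prop :=
  0 ≤ location ∧ location < priorities.length

instance (priorities : List Int) (location : Int) : Decidable (Pre_solution priorities location) := by
  unfold Pre_solution; infer_instance

def pvWitness_solution : List Int × Int := ([2, 1, 3, 2], 2)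

def Spec_solution (priorities : List Int) (location : Int) (out : Int) : Prop := out = solution_alt priorities location
instance (priorities : List Int) (location : Int) (out : Int) : Decidable (Spec_solution priorities location out) := by unfold Spec_solution; infer_instance

-- ===== CLAIM (what is proved, stated in full; the proofs are below) =====
def Claim_equal_solution : Prop := ∀ (priorities : List Int) (location : Int), Dom_solution priorities location → Pre_solution priorities location → Spec_solution priorities location (solution priorities location)

-- ===== LEMMAS AND PROOFS =====


-- ---------- generic list helpers ----------

theorem pv_zip_drop (s q : List Int) (n : Nat) :
    (s.zip q).drop n = (s.drop n).zip (q.drop n) := by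
  induction s generalizing q n with
  | nil => simp
  | cons a t ih =>
    cases q with
    | nil => simp
    | cons b q' =>
      cases n with
      | zero => simp
      | succ m => simp [List.zip_cons_cons, ih q' m]

theorem pv_zip_take (s q : List Int) (n : Nat) :
    (s.zip q).take n = (s.take n).zip (q.take n) := by
  induction s generalizing q n with
  | nil => simp
  | cons a t ih =>
    cases q with
    | nil => simp
    | cons b q' =>
      cases n with
      | zero => simp
      | succ m => simp [List.zip_cons_cons, ih q' m]

theorem pv_findIdx_zip_snd (m : Int) : ∀ (s q : List Int), s.length = q.length →
    (s.zip q).findIdx (fun r => decide (r.2 = m)) = q.findIdx (fun x => decide (x = m)) := by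
  intro s
  induction s with
  | nil => intro q h; cases q with
    | nil => simp
    | cons b q' => simp at h
  | cons a t ih =>
    intro q h
    cases q with
    | nil => simp at h
    | cons b q' =>
      by_cases hb : b = m
      · simp [List.zip_cons_cons, List.findIdx_cons, hb]
      · simp [List.zip_cons_cons, List.findIdx_cons, hb, ih q' (by simpa using h)]

-- ---------- the removal order of the scheduler ----------

def pvFirstMax (items : List (Int × Int)) : Nat :=
  items.findIdx (fun r => decide (r.2 = pvMax (items.map Prod.snd)))

theorem pvFirstMax_lt_length (items : List (Int × Int)) (h : items ≠ []) :
    pvFirstMax items < items.length := by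
  apply List.findIdx_lt_length.mpr
  have hmem : pvMax (items.map Prod.snd) ∈ items.map Prod.snd :=
    pvMax_mem _ (by simpa using h)
  obtain ⟨r, hr, hre⟩ := List.mem_map.mp hmem
  exact ⟨r, hr, by simp [hre]⟩

def rmOrder (items : List (Int × Int)) : List Int :=
  match items with
  | [] => []
  | q :: rest =>
    let k := pvFirstMax (q :: rest)
    ((q :: rest).getD k (0, 0)).1 :: rmOrder ((q :: rest).drop (k + 1) ++ (q :: rest).take k)
termination_by items.length
decreasing_by
  have hk : pvFirstMax (q :: rest) < (q :: rest).length :=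
    pvFirstMax_lt_length _ (by simp)
  simp only [List.length_append, List.length_drop, List.length_take, List.length_cons] at *
  omega

theorem rmOrder_unfold (items : List (Int × Int)) (h : items ≠ []) :
    rmOrder items =
      ((items).getD (pvFirstMax items) (0, 0)).1 ::
        rmOrder (items.drop (pvFirstMax items + 1) ++ items.take (pvFirstMax items)) := by
  match items with
  | q :: rest => rw [rmOrder]

-- ---------- A's loop: rotate-to-the-first-maximum macro step ----------

theorem pvMax_rotate (a : Int) (t : List Int) (h : pvMax (a :: t) ∈ t) :
    pvMax (t ++ [a]) = pvMax (a :: t) := by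
  refine pvMax_eq _ _ (List.mem_append_left _ h) ?_
  intro y hy
  refine le_pvMax (a :: t) y ?_
  rcases List.mem_append.mp hy with h1 | h1
  · exact List.mem_cons_of_mem _ h1
  · simp at h1; simp [h1]

theorem stepA : ∀ (k : Nat) (q s r : List Int), q.length = s.length →
    q.findIdx (fun x => decide (x = pvMax q)) = k →
    q ≠ [] →
    solutionLoop q s r =
      solutionLoop (q.drop (k + 1) ++ q.take k) (s.drop (k + 1) ++ s.take k)
        (r ++ [s.getD k 0]) := by
  intro k
  induction k with
  | zero =>
    intro q s r hlen hidx hne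
    match q, s with
    | a :: t, b :: s' =>
      have ha : decide (a = pvMax (a :: t)) = true := by
        by_contra hc
        rw [List.findIdx_cons] at hidx
        simp only [Bool.not_eq_true] at hc
        simp [hc] at hidx
      have ha' : a = pvMax (a :: t) := by simpa using ha
      have hany : t.any (fun i => decide (a < i)) = false := by
        rw [List.any_eq_false]
        intro i hi
        have := le_pvMax (a :: t) i (List.mem_cons_of_mem _ hi)
        simp; omega
      rw [solutionLoop, if_neg (by simp [hany])]
      simp
  | succ k ih =>
    intro q s r hlen hidx hne
    match q, s with
    | a :: t, b :: s' =>
      have ha : decide (a = pvMax (a :: t)) = false := by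
        by_contra hc
        simp only [Bool.not_eq_false] at hc
        rw [List.findIdx_cons] at hidx
        simp [hc] at hidx
      have hidxt : t.findIdx (fun x => decide (x = pvMax (a :: t))) = k := by
        rw [List.findIdx_cons] at hidx
        simp [ha] at hidx
        omega
      have ha' : a ≠ pvMax (a :: t) := by simpa using ha
      have hmt : pvMax (a :: t) ∈ t := by
        rcases List.mem_cons.mp (pvMax_mem (a :: t) (by simp)) with h1 | h1
        · exact absurd h1.symm ha'
        · exact h1
      have hkt : k < t.length := by
        rw [← hidxt]
        exact List.findIdx_lt_length.mpr ⟨pvMax (a :: t), hmt, by simp⟩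
      have halt : a < pvMax (a :: t) :=
        lt_of_le_of_ne (le_pvMax _ _ (by simp)) ha'
      have hany : t.any (fun i => decide (a < i)) = true :=
        List.any_eq_true.mpr ⟨pvMax (a :: t), hmt, by simpa using halt⟩
      rw [solutionLoop, if_pos (by simp [hany])]
      have hmax2 : pvMax (t ++ [a]) = pvMax (a :: t) := pvMax_rotate a t hmt
      have hidx2 : (t ++ [a]).findIdx (fun x => decide (x = pvMax (t ++ [a]))) = k := by
        rw [hmax2, List.findIdx_append, if_pos (by rw [hidxt]; exact hkt), hidxt]
      have hlen' : (t ++ [a]).length = ((b :: s').drop 1 ++ (b :: s').take 1).length := by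
        simp at hlen ⊢; omega
      rw [ih (t ++ [a]) ((b :: s').drop 1 ++ (b :: s').take 1) r hlen' hidx2 (by simp)]
      have hs' : s'.length = t.length := by simpa using hlen.symm
      congr 1
      · rw [List.drop_append_of_le_length (by omega), List.take_append_of_le_length (by omega)]
        simp [List.append_assoc]
      · have e1 : (b :: s').drop 1 = s' := rfl
        have e2 : (b :: s').take 1 = [b] := rfl
        rw [e1, e2, List.drop_append_of_le_length (by omega),
            List.take_append_of_le_length (by omega)]
        simp [List.append_assoc]
      · rw [List.getD_append _ _ _ _ (by simp; omega)]
        simp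

theorem loopA_rm : ∀ (n : Nat) (q s r : List Int), q.length = n → q.length = s.length →
    solutionLoop q s r = r ++ rmOrder (s.zip q) := by
  intro n
  induction n using Nat.strong_induction_on with
  | _ n ih =>
    intro q s r hn hlen
    match q, s with
    | [], [] => simp [solutionLoop, rmOrder]
    | a :: t, b :: s' =>
      have hlen' : (b :: s').length = (a :: t).length := hlen.symm
      set k := (a :: t).findIdx (fun x => decide (x = pvMax (a :: t))) with hkdef
      have hk : k < (a :: t).length :=
        List.findIdx_lt_length.mpr ⟨pvMax (a :: t), pvMax_mem _ (by simp), by simp⟩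
      have hstep := stepA k (a :: t) (b :: s') r hlen hkdef.symm (by simp)
      rw [hstep]
      have hzlen : ((a :: t).drop (k + 1) ++ (a :: t).take k).length < n := by
        simp only [List.length_append, List.length_drop, List.length_take,
          List.length_cons] at *
        omega
      rw [ih _ hzlen _ _ _ rfl (by
        simp only [List.length_append, List.length_drop, List.length_take,
          List.length_cons] at *
        omega)]
      -- identify the zip state with rmOrder's recursive argument
      have hfz : pvFirstMax ((b :: s').zip (a :: t)) = k := by
        unfold pvFirstMax
        rw [List.map_snd_zip (le_of_eq hlen'.symm)]
        exact pv_findIdx_zip_snd _ (b :: s') (a :: t) hlen'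
      have hzne : (b :: s').zip (a :: t) ≠ [] := by simp
      rw [rmOrder_unfold _ hzne, hfz]
      have hk2 : k < ((b :: s').zip (a :: t)).length := by
        simp only [List.length_zip]
        simp only [List.length_cons] at *
        omega
      have hget : (((b :: s').zip (a :: t)).getD k (0, 0)).1 = (b :: s').getD k 0 := by
        rw [List.getD_eq_getElem _ _ hk2, List.getD_eq_getElem _ _ (by
          simp only [List.length_cons] at *; omega)]
        exact congrArg Prod.fst (List.getElem_zip (h := hk2))
      rw [hget, List.append_assoc, List.singleton_append]
      congr 2
      rw [pv_zip_drop, pv_zip_take, List.zip_append (by simp only [List.length_drop]; omega)]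

-- ---------- A as an index into the removal order ----------

theorem pv_zip_pyRange_enumerate : ∀ (xs : List Int) (a : Int),
    (PySem.List.pyRange a (a + xs.length) 1).zip xs = PySem.List.enumerate xs a := by
  intro xs
  induction xs with
  | nil =>
    intro a
    have : a + (([] : List Int).length : Int) = a := by simp
    rw [this, PySem.List.pyRange_one_eq_nil (le_refl a)]
    simp
  | cons x t ih =>
    intro a
    have h1 : a < a + ((x :: t).length : Int) := by
      simp only [List.length_cons]; push_cast; omega
    rw [PySem.List.pyRange_one_cons h1, PySem.List.enumerate_cons]
    have h2 : a + ((x :: t).length : Int) = (a + 1) + (t.length : Int) := by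
      simp only [List.length_cons]; push_cast; omega
    rw [h2]
    simp [List.zip_cons_cons, ih (a + 1)]

theorem solution_eq_rm (priorities : List Int) (location : Int) :
    solution priorities location =
      (match PySem.List.index? (rmOrder (PySem.List.enumerate priorities 0)) location with
       | some j => (j : Int) + 1
       | none => 0) := by
  rw [show solution priorities location
      = (match PySem.List.index? (solutionLoop priorities
          (PySem.List.pyRange 0 (PySem.List.len priorities) 1) []) location with
         | some j => (j : Int) + 1
         | none => 0) from rfl]
  have hlen : priorities.length = (PySem.List.pyRange 0 (PySem.List.len priorities) 1).length := by
    rw [PySem.List.length_pyRange_one, PySem.List.len_eq]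
    simp
  rw [loopA_rm priorities.length priorities _ [] rfl hlen]
  have : PySem.List.pyRange 0 (PySem.List.len priorities) 1
      = PySem.List.pyRange 0 ((0 : Int) + priorities.length) 1 := by
    rw [PySem.List.len_eq]; norm_num
  rw [this, pv_zip_pyRange_enumerate priorities 0]
  simp

-- ---------- one whole priority level of the removal order ----------

theorem pv_first_split {α : Type} (P : α → Bool) :
    ∀ (l : List α), l.any P = true →
      ∃ l₁ x l₂, l = l₁ ++ x :: l₂ ∧ P x = true ∧ ∀ z ∈ l₁, P z = false := by
  intro l
  induction l with
  | nil => intro h; simp at h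
  | cons a t ih =>
    intro h
    cases ha : P a with
    | true => exact ⟨[], a, t, by simp, ha, by simp⟩
    | false =>
      have ht : t.any P = true := by
        rcases List.any_eq_true.mp h with ⟨x, hx, hpx⟩
        rcases List.mem_cons.mp hx with rfl | hx'
        · rw [ha] at hpx; exact absurd hpx (by simp)
        · exact List.any_eq_true.mpr ⟨x, hx', hpx⟩
      obtain ⟨l₁, x, l₂, heq, hpx, hnone⟩ := ih ht
      refine ⟨a :: l₁, x, l₂, by simp [heq], hpx, ?_⟩
      intro z hz
      rcases List.mem_cons.mp hz with rfl | hz'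
      · exact ha
      · exact hnone z hz'

theorem pvFirstMax_at (pre : List (Int × Int)) (x : Int × Int) (suf : List (Int × Int)) (m : Int)
    (hm : pvMax ((pre ++ x :: suf).map Prod.snd) = m)
    (hpre : ∀ z ∈ pre, z.2 ≠ m) (hx : x.2 = m) :
    pvFirstMax (pre ++ x :: suf) = pre.length := by
  unfold pvFirstMax
  rw [hm, List.findIdx_append]
  have hnot : List.findIdx (fun r => decide (r.2 = m)) pre = pre.length := by
    apply List.findIdx_eq_length.mpr
    intro z hz
    simpa using hpre z hz
  rw [hnot, if_neg (by omega), List.findIdx_cons]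
  simp [hx]

theorem rmOrder_decomp (pre : List (Int × Int)) (x : Int × Int) (suf : List (Int × Int)) (m : Int)
    (hm : pvMax ((pre ++ x :: suf).map Prod.snd) = m)
    (hpre : ∀ z ∈ pre, z.2 ≠ m) (hx : x.2 = m) :
    rmOrder (pre ++ x :: suf) = x.1 :: rmOrder (suf ++ pre) := by
  rw [rmOrder_unfold _ (by simp), pvFirstMax_at pre x suf m hm hpre hx]
  have hget : ((pre ++ x :: suf).getD pre.length (0, 0)) = x := by
    rw [List.getD_eq_getElem _ _ (by simp)]
    rw [List.getElem_append_right (le_refl _)]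
    simp
  have hdrop : (pre ++ x :: suf).drop (pre.length + 1) = suf := by
    have : pre ++ x :: suf = (pre ++ [x]) ++ suf := by simp
    rw [this, show pre.length + 1 = (pre ++ [x]).length by simp, List.drop_left]
  have htake : (pre ++ x :: suf).take pre.length = pre := List.take_left
  rw [hget, hdrop, htake]

theorem pvMax_snd_eq (items : List (Int × Int)) (m : Int)
    (hmem : ∃ q ∈ items, q.2 = m) (hub : ∀ q ∈ items, q.2 ≤ m) :
    pvMax (items.map Prod.snd) = m := by
  obtain ⟨q, hq, hq2⟩ := hmem
  refine pvMax_eq _ m (List.mem_map.mpr ⟨q, hq, hq2⟩) ?_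
  intro y hy
  obtain ⟨z, hz, hze⟩ := List.mem_map.mp hy
  exact hze ▸ hub z hz

theorem levelStep : ∀ (n : Nat) (alpha : List (Int × Int)) (y : Int × Int)
    (beta : List (Int × Int)) (m : Int),
    alpha.countP (fun q => decide (q.2 = m)) = n →
    pvMax ((alpha ++ y :: beta).map Prod.snd) = m →
    y.2 = m →
    (∀ q ∈ beta, q.2 ≠ m) →
    rmOrder (alpha ++ y :: beta) =
      ((alpha ++ y :: beta).filter (fun q => decide (q.2 = m))).map Prod.fst ++
        rmOrder (beta ++ alpha.filter (fun q => !decide (q.2 = m))) := by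
  intro n
  induction n using Nat.strong_induction_on with
  | _ n ih =>
    intro alpha y beta m hcnt hm hy hbeta
    cases hany : alpha.any (fun q => decide (q.2 = m)) with
    | false =>
      have hnone : ∀ z ∈ alpha, z.2 ≠ m := by
        intro z hz
        have := List.any_eq_false.mp hany z hz
        simpa using this
      rw [rmOrder_decomp alpha y beta m hm hnone hy]
      have hfa : alpha.filter (fun q => decide (q.2 = m)) = [] :=
        List.filter_eq_nil_iff.mpr (by intro z hz; simpa using hnone z hz)
      have hfb : beta.filter (fun q => decide (q.2 = m)) = [] :=
        List.filter_eq_nil_iff.mpr (by intro z hz; simpa using hbeta z hz)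
      have hfa2 : alpha.filter (fun q => !decide (q.2 = m)) = alpha :=
        List.filter_eq_self.mpr (by intro z hz; simpa using hnone z hz)
      simp [List.filter_append, hy, hfa, hfb, hfa2]
    | true =>
      obtain ⟨a1, x, a2, heq, hx, ha1⟩ := pv_first_split _ alpha hany
      have hx2 : x.2 = m := by simpa using hx
      have ha1' : ∀ z ∈ a1, z.2 ≠ m := by intro z hz; simpa using ha1 z hz
      subst heq
      -- one removal: the first maximum is x
      have hre : a1 ++ x :: a2 ++ y :: beta = a1 ++ x :: (a2 ++ y :: beta) := by simp
      have hm1 : pvMax ((a1 ++ x :: (a2 ++ y :: beta)).map Prod.snd) = m := by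
        rw [← hre]; exact hm
      rw [hre, rmOrder_decomp a1 x (a2 ++ y :: beta) m hm1 ha1' hx2]
      -- recursive level step on the rotated rest
      have hm2 : pvMax ((a2 ++ y :: (beta ++ a1)).map Prod.snd) = m := by
        apply pvMax_snd_eq
        · exact ⟨y, by simp, hy⟩
        · intro q hq
          have hq' : q ∈ a1 ++ x :: (a2 ++ y :: beta) := by
            simp at hq ⊢; tauto
          have := le_pvMax ((a1 ++ x :: (a2 ++ y :: beta)).map Prod.snd) q.2
            (List.mem_map.mpr ⟨q, hq', rfl⟩)
          omega
      have hcnt2 : a2.countP (fun q => decide (q.2 = m)) <  n := by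
        rw [← hcnt, List.countP_append, List.countP_cons]
        simp [hx2]
        omega
      have hbeta2 : ∀ q ∈ beta ++ a1, q.2 ≠ m := by
        intro q hq
        rcases List.mem_append.mp hq with h1 | h1
        · exact hbeta q h1
        · exact ha1' q h1
      have happ : (a2 ++ y :: beta) ++ a1 = a2 ++ y :: (beta ++ a1) := by simp
      rw [happ, ih _ hcnt2 a2 y (beta ++ a1) m rfl hm2 hy hbeta2]
      -- reassemble the filters
      have hfa1 : a1.filter (fun q => decide (q.2 = m)) = [] :=
        List.filter_eq_nil_iff.mpr (by intro z hz; simpa using ha1' z hz)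
      have hfb : beta.filter (fun q => decide (q.2 = m)) = [] :=
        List.filter_eq_nil_iff.mpr (by intro z hz; simpa using hbeta z hz)
      have hfa1' : a1.filter (fun q => !decide (q.2 = m)) = a1 :=
        List.filter_eq_self.mpr (by intro z hz; simpa using ha1' z hz)
      simp [List.filter_append, hy, hx2, hfa1, hfb, hfa1',
        List.append_assoc]

-- ---------- B-side small lemmas ----------

theorem inner_found : ∀ (seq : List Int) (loc rank : Int), loc ∈ seq →
    ∃ j : Nat, PySem.List.index? seq loc = some j ∧
      solutionAltInner seq loc rank = Sum.inl (rank + j + 1) := by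
  intro seq
  induction seq with
  | nil => intro loc rank h; simp at h
  | cons i rest ih =>
    intro loc rank h
    by_cases hi : i = loc
    · subst hi
      exact ⟨0, PySem.List.index?_cons_self _ _, by rw [solutionAltInner, if_pos rfl]; simp⟩
    · have hloc : loc ∈ rest := by rcases List.mem_cons.mp h with h1 | h1; exact absurd h1.symm hi; exact h1
      obtain ⟨j, hj1, hj2⟩ := ih loc (rank + 1) hloc
      refine ⟨j + 1, ?_, ?_⟩
      · rw [PySem.List.index?_cons_of_ne _ hi, hj1]; rfl
      · rw [solutionAltInner, if_neg hi, hj2]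
        congr 1
        push_cast
        ring

theorem inner_notfound : ∀ (seq : List Int) (loc rank : Int), loc ∉ seq →
    solutionAltInner seq loc rank = Sum.inr (rank + seq.length) := by
  intro seq
  induction seq with
  | nil => intro loc rank _; simp [solutionAltInner]
  | cons i rest ih =>
    intro loc rank h
    have hi : i ≠ loc := fun he => h (he ▸ List.mem_cons_self ..)
    rw [solutionAltInner, if_neg hi, ih loc (rank + 1) (fun hc => h (List.mem_cons_of_mem _ hc))]
    congr 1
    simp only [List.length_cons]
    push_cast
    ring

theorem pv_index?_append_right (pre post : List Int) (loc : Int) (h : loc ∉ pre) :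
    PySem.List.index? (pre ++ post) loc = (PySem.List.index? post loc).map (· + pre.length) := by
  induction pre with
  | nil => simp [Option.map_id']
  | cons a t ih =>
    have ha : a ≠ loc := fun he => h (he ▸ List.mem_cons_self ..)
    rw [List.cons_append, PySem.List.index?_cons_of_ne _ ha,
      ih (fun hc => h (List.mem_cons_of_mem _ hc))]
    cases PySem.List.index? post loc with
    | none => rfl
    | some j =>
        simp only [Option.map_some, List.length_cons]
        congr 1

-- the grouping dict: groups[v] is the list of indices whose priority is v
theorem groups_getD (priorities : List Int) (v : Int) :
    ((PySem.List.enumerate priorities 0).foldl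
        (fun d q => d.modify q.2 [] (fun vs => vs ++ [q.1])) PySem.Dict.empty).getD v []
      = ((PySem.List.enumerate priorities 0).filter
          (fun q => decide (q.2 = v))).map Prod.fst := by
  have hfold : (PySem.List.enumerate priorities 0).foldl
        (fun d q => d.modify q.2 [] (fun vs => vs ++ [q.1])) PySem.Dict.empty
      = ((PySem.List.enumerate priorities 0).map (fun q => (q.2, q.1))).foldl
          (fun d p => d.modify p.1 [] (fun vs => vs ++ [p.2])) PySem.Dict.empty := by
    rw [List.foldl_map]
  rw [hfold, PySem.Dict.getD_foldl_modify_append, List.filter_map]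
  simp only [PySem.Dict.getD_empty, List.nil_append, List.map_map]
  have hfn : ((fun x : Int × Int => x.2) ∘ (fun q : Int × Int => (q.2, q.1))) = Prod.fst :=
    funext (fun q => rfl)
  rw [hfn]
  apply congrArg
  apply List.filter_congr
  intro q hq
  show (q.2 == v) = decide (q.2 = v)
  rw [Bool.eq_iff_iff]
  simp

theorem groups_keys (priorities : List Int) :
    ((PySem.List.enumerate priorities 0).foldl
        (fun d q => d.modify q.2 [] (fun vs => vs ++ [q.1])) PySem.Dict.empty).keys
      = PySem.Set.ofList priorities := by
  rw [PySem.Dict.keys_foldl_modify_key (PySem.List.enumerate priorities 0)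
    (fun q => q.2) [] (fun _ q vs => vs ++ [q.1]) PySem.Dict.empty]
  rw [PySem.List.map_snd_enumerate]
  rfl

-- elements of the enumeration have pairwise distinct, ordered first components
theorem pv_fst_unique : ∀ (E : List (Int × Int)),
    List.Pairwise (fun a b : Int × Int => a.1 < b.1) E →
    ∀ q ∈ E, ∀ y ∈ E, q.1 = y.1 → q = y := by
  intro E
  induction E with
  | nil => intro _ q hq; simp at hq
  | cons e E' ih =>
    intro hE q hq y hy hqy
    have he : ∀ z ∈ E', e.1 < z.1 := List.pairwise_cons.mp hE |>.1
    have hE' := List.pairwise_cons.mp hE |>.2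
    rcases List.mem_cons.mp hq with rfl | hq' <;> rcases List.mem_cons.mp hy with rfl | hy'
    · rfl
    · exact absurd hqy (by have := he y hy'; omega)
    · exact absurd hqy (by have := he q hq'; omega)
    · exact ih hE' q hq' y hy' hqy

theorem pv_filter_singleton (y : Int × Int) (P : Int × Int → Bool) (hPy : P y = true) :
    ∀ (E : List (Int × Int)),
    List.Pairwise (fun a b : Int × Int => a.1 < b.1) E →
    y ∈ E →
    (∀ q ∈ E, P q = true → q = y) →
    E.filter P = [y] := by
  intro E
  induction E with
  | nil => intro _ hy; simp at hy
  | cons e E' ih =>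
    intro hE hy hchar
    have he : ∀ z ∈ E', e.1 < z.1 := List.pairwise_cons.mp hE |>.1
    have hE' := List.pairwise_cons.mp hE |>.2
    rcases List.mem_cons.mp hy with rfl | hy'
    · have hnil : E'.filter P = [] := by
        apply List.filter_eq_nil_iff.mpr
        intro q hq
        by_contra hc
        have hqy : q = y := hchar q (List.mem_cons_of_mem _ hq) (by simpa using hc)
        have h2 := he q hq
        rw [hqy] at h2
        exact lt_irrefl _ h2
      rw [List.filter_cons_of_pos hPy, hnil]
    · have hPe : P e = false := by
        by_contra hc
        have hey : e = y := hchar e (List.mem_cons_self ..) (by simpa using hc)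
        have h2 := he y hy'
        rw [hey] at h2
        exact lt_irrefl _ h2
      rw [List.filter_cons_of_neg (by simp [hPe])]
      exact ih hE' hy' (fun q hq hPq => hchar q (List.mem_cons_of_mem _ hq) hPq)

-- splitting a filter of a fst-sorted list at a pivot
theorem pv_filter_split (Q : Int × Int → Bool) (c : Int) :
    ∀ (E : List (Int × Int)),
    List.Pairwise (fun a b : Int × Int => a.1 < b.1) E →
    E.filter (fun q => Q q && decide (q.1 < c)) ++ E.filter (fun q => Q q && decide (c ≤ q.1))
      = E.filter Q := by
  intro E
  induction E with
  | nil => intro _; simp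
  | cons e E' ih =>
    intro hE
    have he : ∀ z ∈ E', e.1 < z.1 := List.pairwise_cons.mp hE |>.1
    have hE' := List.pairwise_cons.mp hE |>.2
    by_cases hc : e.1 < c
    · cases hQ : Q e with
      | false =>
        rw [List.filter_cons_of_neg (by simp [hQ]), List.filter_cons_of_neg (by simp [hQ]),
          List.filter_cons_of_neg (by simp [hQ])]
        exact ih hE'
      | true =>
        rw [List.filter_cons_of_pos (by simp [hQ, hc]), List.filter_cons_of_neg (by simp [hQ, hc]),
          List.filter_cons_of_pos hQ, List.cons_append]
        rw [ih hE']
    · have hlow : (e :: E').filter (fun q => Q q && decide (q.1 < c)) = [] := by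
        apply List.filter_eq_nil_iff.mpr
        intro q hq
        rcases List.mem_cons.mp hq with rfl | hq'
        · simp; omega
        · have := he q hq'; simp; omega
      rw [hlow, List.nil_append]
      apply List.filter_congr
      intro q hq
      rcases List.mem_cons.mp hq with rfl | hq'
      · simp; omega
      · have := he q hq'; simp; omega

-- ---------- the level-loop state and its transition ----------

def pvE (priorities : List Int) : List (Int × Int) := PySem.List.enumerate priorities 0

def pvGroups (priorities : List Int) : PySem.Dict Int (List Int) :=
  (PySem.List.enumerate priorities 0).foldl
    (fun d q => d.modify q.2 [] (fun vs => vs ++ [q.1])) PySem.Dict.empty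

def pvSH (E : List (Int × Int)) (K : List Int) (s : Int) : List (Int × Int) :=
  E.filter (fun q => decide (q.2 ∈ K) && decide (s ≤ q.1))

def pvSL (E : List (Int × Int)) (K : List Int) (s : Int) : List (Int × Int) :=
  E.filter (fun q => decide (q.2 ∈ K) && decide (q.1 < s))

def pvState (E : List (Int × Int)) (K : List Int) (s : Int) : List (Int × Int) :=
  pvSH E K s ++ pvSL E K s

theorem pv_group_last (E : List (Int × Int))
    (hE : List.Pairwise (fun a b : Int × Int => a.1 < b.1) E)
    (P : Int × Int → Bool) (hne : E.filter P ≠ []) :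
    ∃ y, y ∈ E ∧ P y = true ∧ (E.filter P).getLast? = some y ∧
      (∀ q ∈ E, P q = true → q.1 ≤ y.1) := by
  set y := (E.filter P).getLast hne with hydef
  have hyF : y ∈ E.filter P := List.getLast_mem hne
  have hyE : y ∈ E := (List.mem_filter.mp hyF).1
  have hPy : P y = true := (List.mem_filter.mp hyF).2
  have hFs : List.Pairwise (fun a b : Int × Int => a.1 < b.1) (E.filter P) :=
    List.Pairwise.filter _ hE
  have hub : ∀ q ∈ E, P q = true → q.1 ≤ y.1 := by
    intro q hq hPq
    have hqF : q ∈ E.filter P := List.mem_filter.mpr ⟨hq, hPq⟩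
    have hsplit := List.dropLast_append_getLast hne
    rw [← hydef] at hsplit
    rw [← hsplit] at hqF
    rcases List.mem_append.mp hqF with h1 | h1
    · rw [← hsplit] at hFs
      have := (List.pairwise_append.mp hFs).2.2 q h1 y (by simp)
      omega
    · simp at h1
      rw [h1]
  refine ⟨y, hyE, hPy, ?_, hub⟩
  rw [List.getLast?_eq_some_getLast hne]

theorem caseA_decomp (E : List (Int × Int))
    (hE : List.Pairwise (fun a b : Int × Int => a.1 < b.1) E)
    (p : Int) (ps : List Int) (hps : ∀ v ∈ ps, v < p) (s : Int) (y : Int × Int)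
    (hyE : y ∈ E) (hy2 : y.2 = p) (hys : y.1 < s)
    (hlast : ∀ q ∈ E, q.2 = p → q.1 < s → q.1 ≤ y.1) :
    ∃ alpha beta,
      pvState E (p :: ps) s = alpha ++ y :: beta ∧
      (∀ q ∈ beta, q.2 ≠ p) ∧
      beta ++ alpha.filter (fun q => !decide (q.2 = p)) = pvState E ps (y.1 + 1) := by
  refine ⟨pvSH E (p :: ps) s ++
      E.filter (fun q => decide (q.2 ∈ p :: ps) && decide (q.1 < y.1)),
    E.filter (fun q => decide (q.2 ∈ ps) && decide (y.1 + 1 ≤ q.1) && decide (q.1 < s)),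
    ?_, ?_, ?_⟩
  · -- decomposition of the state around y
    have h1 : pvSL E (p :: ps) s =
        E.filter (fun q => (decide (q.2 ∈ p :: ps) && decide (q.1 < s)) && decide (q.1 < y.1 + 1))
          ++ E.filter (fun q => (decide (q.2 ∈ p :: ps) && decide (q.1 < s)) && decide (y.1 + 1 ≤ q.1)) := by
      rw [pvSL, ← pv_filter_split (fun q => decide (q.2 ∈ p :: ps) && decide (q.1 < s)) (y.1 + 1) E hE]
    have h2 : E.filter (fun q => (decide (q.2 ∈ p :: ps) && decide (q.1 < s)) && decide (q.1 < y.1 + 1))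
        = E.filter (fun q => (decide (q.2 ∈ p :: ps) && decide (q.1 < y.1 + 1)) && decide (q.1 < y.1))
          ++ E.filter (fun q => (decide (q.2 ∈ p :: ps) && decide (q.1 < y.1 + 1)) && decide (y.1 ≤ q.1)) := by
      have hc : ∀ q ∈ E, ((fun q : Int × Int => (decide (q.2 ∈ p :: ps) && decide (q.1 < s)) && decide (q.1 < y.1 + 1)) q)
          = ((fun q : Int × Int => decide (q.2 ∈ p :: ps) && decide (q.1 < y.1 + 1)) q) := by
        intro q hq
        rw [Bool.eq_iff_iff]
        simp only [Bool.and_eq_true, decide_eq_true_eq]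
        constructor
        · rintro ⟨⟨hA, h1⟩, h2⟩
          exact ⟨hA, h2⟩
        · rintro ⟨hA, h2⟩
          exact ⟨⟨hA, by omega⟩, h2⟩
      rw [List.filter_congr hc]
      rw [← pv_filter_split (fun q => decide (q.2 ∈ p :: ps) && decide (q.1 < y.1 + 1)) y.1 E hE]
    have h3 : E.filter (fun q => (decide (q.2 ∈ p :: ps) && decide (q.1 < y.1 + 1)) && decide (q.1 < y.1))
        = E.filter (fun q => decide (q.2 ∈ p :: ps) && decide (q.1 < y.1)) := by
      apply List.filter_congr
      intro q hq
      rw [Bool.eq_iff_iff]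
      simp only [Bool.and_eq_true, decide_eq_true_eq]
      constructor
      · rintro ⟨⟨hA, h1⟩, h2⟩
        exact ⟨hA, h2⟩
      · rintro ⟨hA, h2⟩
        exact ⟨⟨hA, by omega⟩, h2⟩
    have h4 : E.filter (fun q => (decide (q.2 ∈ p :: ps) && decide (q.1 < y.1 + 1)) && decide (y.1 ≤ q.1))
        = [y] := by
      apply pv_filter_singleton y _ (by simp [hy2]) E hE hyE
      intro q hq hPq
      simp only [Bool.and_eq_true, decide_eq_true_eq] at hPq
      exact pv_fst_unique E hE q hq y hyE (by omega)
    have h5 : E.filter (fun q => (decide (q.2 ∈ p :: ps) && decide (q.1 < s)) && decide (y.1 + 1 ≤ q.1))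
        = E.filter (fun q => decide (q.2 ∈ ps) && decide (y.1 + 1 ≤ q.1) && decide (q.1 < s)) := by
      apply List.filter_congr
      intro q hq
      rw [Bool.eq_iff_iff]
      simp only [Bool.and_eq_true, decide_eq_true_eq, List.mem_cons]
      constructor
      · rintro ⟨⟨hk, hlt⟩, hge⟩
        rcases hk with hk | hk
        · exact absurd (hlast q hq hk hlt) (by omega)
        · exact ⟨⟨hk, hge⟩, hlt⟩
      · rintro ⟨⟨hk, hge⟩, hlt⟩
        exact ⟨⟨Or.inr hk, hlt⟩, hge⟩
    rw [pvState, h1, h2, h3, h4, h5]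
    simp [List.append_assoc]
  · intro q hq
    have := (List.mem_filter.mp hq).2
    simp only [Bool.and_eq_true, decide_eq_true_eq] at this
    have hv := hps q.2 this.1.1
    omega
  · -- the rotated remainder is the state for the next level
    have t1 : (pvSH E (p :: ps) s).filter (fun q => !decide (q.2 = p))
        = E.filter (fun q => decide (q.2 ∈ ps) && decide (s ≤ q.1)) := by
      rw [pvSH, List.filter_filter]
      apply List.filter_congr
      intro q hq
      rw [Bool.eq_iff_iff]
      simp only [Bool.and_eq_true, decide_eq_true_eq, Bool.not_eq_true', decide_eq_false_iff_not,
        List.mem_cons]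
      constructor
      · rintro ⟨hne, hk | hk, hge⟩
        · exact absurd hk hne
        · exact ⟨hk, hge⟩
      · rintro ⟨hk, hge⟩
        exact ⟨by have := hps q.2 hk; omega, Or.inr hk, hge⟩
    have t2 : (E.filter (fun q => decide (q.2 ∈ p :: ps) && decide (q.1 < y.1))).filter
          (fun q => !decide (q.2 = p))
        = E.filter (fun q => decide (q.2 ∈ ps) && decide (q.1 < y.1)) := by
      rw [List.filter_filter]
      apply List.filter_congr
      intro q hq
      rw [Bool.eq_iff_iff]
      simp only [Bool.and_eq_true, decide_eq_true_eq, Bool.not_eq_true', decide_eq_false_iff_not,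
        List.mem_cons]
      constructor
      · rintro ⟨hne, hk | hk, hlt⟩
        · exact absurd hk hne
        · exact ⟨hk, hlt⟩
      · rintro ⟨hk, hlt⟩
        exact ⟨by have := hps q.2 hk; omega, Or.inr hk, hlt⟩
    have t3 : pvSH E ps (y.1 + 1)
        = E.filter (fun q => (decide (q.2 ∈ ps) && decide (y.1 + 1 ≤ q.1)) && decide (q.1 < s))
          ++ E.filter (fun q => decide (q.2 ∈ ps) && decide (s ≤ q.1)) := by
      rw [pvSH, ← pv_filter_split (fun q => decide (q.2 ∈ ps) && decide (y.1 + 1 ≤ q.1)) s E hE]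
      congr 1
      apply List.filter_congr
      intro q hq
      rw [Bool.eq_iff_iff]
      simp only [Bool.and_eq_true, decide_eq_true_eq]
      constructor
      · rintro ⟨⟨hA, h1⟩, h2⟩
        exact ⟨hA, h2⟩
      · rintro ⟨hA, h2⟩
        exact ⟨⟨hA, by omega⟩, h2⟩
    have t4 : pvSL E ps (y.1 + 1)
        = E.filter (fun q => decide (q.2 ∈ ps) && decide (q.1 < y.1)) := by
      rw [pvSL]
      apply List.filter_congr
      intro q hq
      rw [Bool.eq_iff_iff]
      simp only [Bool.and_eq_true, decide_eq_true_eq]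
      constructor
      · rintro ⟨hk, hlt⟩
        refine ⟨hk, ?_⟩
        rcases lt_or_eq_of_le (by omega : q.1 ≤ y.1) with h | h
        · exact h
        · have : q = y := pv_fst_unique E hE q hq y hyE h
          subst this
          exact absurd hk (by intro hk2; have := hps q.2 hk2; omega)
      · rintro ⟨hk, hlt⟩
        exact ⟨hk, by omega⟩
    rw [List.filter_append, t1, t2, pvState, t3, t4]
    simp [List.append_assoc]

theorem caseB_decomp (E : List (Int × Int))
    (hE : List.Pairwise (fun a b : Int × Int => a.1 < b.1) E)
    (p : Int) (ps : List Int) (hps : ∀ v ∈ ps, v < p) (s : Int) (y : Int × Int)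
    (hyE : y ∈ E) (hy2 : y.2 = p) (hys : s ≤ y.1)
    (hnolow : ∀ q ∈ E, q.2 = p → s ≤ q.1)
    (hlast : ∀ q ∈ E, q.2 = p → q.1 ≤ y.1) :
    ∃ alpha beta,
      pvState E (p :: ps) s = alpha ++ y :: beta ∧
      (∀ q ∈ beta, q.2 ≠ p) ∧
      beta ++ alpha.filter (fun q => !decide (q.2 = p)) = pvState E ps (y.1 + 1) := by
  refine ⟨E.filter (fun q => (decide (q.2 ∈ p :: ps) && decide (s ≤ q.1)) && decide (q.1 < y.1)),
    E.filter (fun q => decide (q.2 ∈ ps) && decide (y.1 + 1 ≤ q.1)) ++ pvSL E (p :: ps) s,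
    ?_, ?_, ?_⟩
  · have h1 : pvSH E (p :: ps) s =
        E.filter (fun q => (decide (q.2 ∈ p :: ps) && decide (s ≤ q.1)) && decide (q.1 < y.1 + 1))
          ++ E.filter (fun q => (decide (q.2 ∈ p :: ps) && decide (s ≤ q.1)) && decide (y.1 + 1 ≤ q.1)) := by
      rw [pvSH, ← pv_filter_split (fun q => decide (q.2 ∈ p :: ps) && decide (s ≤ q.1)) (y.1 + 1) E hE]
    have h2 : E.filter (fun q => (decide (q.2 ∈ p :: ps) && decide (s ≤ q.1)) && decide (q.1 < y.1 + 1))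
        = E.filter (fun q => ((decide (q.2 ∈ p :: ps) && decide (s ≤ q.1)) && decide (q.1 < y.1 + 1)) && decide (q.1 < y.1))
          ++ E.filter (fun q => ((decide (q.2 ∈ p :: ps) && decide (s ≤ q.1)) && decide (q.1 < y.1 + 1)) && decide (y.1 ≤ q.1)) := by
      rw [← pv_filter_split (fun q => (decide (q.2 ∈ p :: ps) && decide (s ≤ q.1)) && decide (q.1 < y.1 + 1)) y.1 E hE]
    have h3 : E.filter (fun q => ((decide (q.2 ∈ p :: ps) && decide (s ≤ q.1)) && decide (q.1 < y.1 + 1)) && decide (q.1 < y.1))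
        = E.filter (fun q => (decide (q.2 ∈ p :: ps) && decide (s ≤ q.1)) && decide (q.1 < y.1)) := by
      apply List.filter_congr
      intro q hq
      rw [Bool.eq_iff_iff]
      simp only [Bool.and_eq_true, decide_eq_true_eq]
      constructor
      · rintro ⟨⟨hB, h1⟩, h2⟩
        exact ⟨hB, h2⟩
      · rintro ⟨hB, h2⟩
        exact ⟨⟨hB, by omega⟩, h2⟩
    have h4 : E.filter (fun q => ((decide (q.2 ∈ p :: ps) && decide (s ≤ q.1)) && decide (q.1 < y.1 + 1)) && decide (y.1 ≤ q.1))
        = [y] := by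
      apply pv_filter_singleton y _ (by simp [hy2, hys]) E hE hyE
      intro q hq hPq
      simp only [Bool.and_eq_true, decide_eq_true_eq] at hPq
      exact pv_fst_unique E hE q hq y hyE (by omega)
    have h5 : E.filter (fun q => (decide (q.2 ∈ p :: ps) && decide (s ≤ q.1)) && decide (y.1 + 1 ≤ q.1))
        = E.filter (fun q => decide (q.2 ∈ ps) && decide (y.1 + 1 ≤ q.1)) := by
      apply List.filter_congr
      intro q hq
      rw [Bool.eq_iff_iff]
      simp only [Bool.and_eq_true, decide_eq_true_eq, List.mem_cons]
      constructor
      · rintro ⟨⟨hk, hge⟩, hc⟩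
        rcases hk with hk | hk
        · exact absurd (hlast q hq hk) (by omega)
        · exact ⟨hk, hc⟩
      · rintro ⟨hk, hc⟩
        exact ⟨⟨Or.inr hk, by omega⟩, hc⟩
    rw [pvState, h1, h2, h3, h4, h5]
    simp [List.append_assoc]
  · intro q hq
    rcases List.mem_append.mp hq with h1 | h1
    · have := (List.mem_filter.mp h1).2
      simp only [Bool.and_eq_true, decide_eq_true_eq] at this
      have := hps q.2 this.1
      omega
    · have hqE := (List.mem_filter.mp h1).1
      have := (List.mem_filter.mp h1).2
      simp only [Bool.and_eq_true, decide_eq_true_eq] at this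
      intro hc
      exact absurd (hnolow q hqE hc) (by omega)
  · have t1 : (E.filter (fun q => (decide (q.2 ∈ p :: ps) && decide (s ≤ q.1)) && decide (q.1 < y.1))).filter
          (fun q => !decide (q.2 = p))
        = E.filter (fun q => (decide (q.2 ∈ ps) && decide (s ≤ q.1)) && decide (q.1 < y.1)) := by
      rw [List.filter_filter]
      apply List.filter_congr
      intro q hq
      rw [Bool.eq_iff_iff]
      simp only [Bool.and_eq_true, decide_eq_true_eq, Bool.not_eq_true', decide_eq_false_iff_not,
        List.mem_cons]
      constructor
      · rintro ⟨hne, ⟨hk | hk, hge⟩, hlt⟩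
        · exact absurd hk hne
        · exact ⟨⟨hk, hge⟩, hlt⟩
      · rintro ⟨⟨hk, hge⟩, hlt⟩
        exact ⟨by have := hps q.2 hk; omega, ⟨Or.inr hk, hge⟩, hlt⟩
    have t2 : pvSL E (p :: ps) s = E.filter (fun q => decide (q.2 ∈ ps) && decide (q.1 < s)) := by
      rw [pvSL]
      apply List.filter_congr
      intro q hq
      rw [Bool.eq_iff_iff]
      simp only [Bool.and_eq_true, decide_eq_true_eq, List.mem_cons]
      constructor
      · rintro ⟨hk | hk, hlt⟩
        · exact absurd (hnolow q hq hk) (by omega)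
        · exact ⟨hk, hlt⟩
      · rintro ⟨hk, hlt⟩
        exact ⟨Or.inr hk, hlt⟩
    have t3 : pvSL E ps (y.1 + 1)
        = E.filter (fun q => (decide (q.2 ∈ ps) && decide (q.1 < y.1 + 1)) && decide (q.1 < s))
          ++ E.filter (fun q => (decide (q.2 ∈ ps) && decide (q.1 < y.1 + 1)) && decide (s ≤ q.1)) := by
      rw [pvSL, ← pv_filter_split (fun q => decide (q.2 ∈ ps) && decide (q.1 < y.1 + 1)) s E hE]
    have t4 : E.filter (fun q => (decide (q.2 ∈ ps) && decide (q.1 < y.1 + 1)) && decide (q.1 < s))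
        = E.filter (fun q => decide (q.2 ∈ ps) && decide (q.1 < s)) := by
      apply List.filter_congr
      intro q hq
      rw [Bool.eq_iff_iff]
      simp only [Bool.and_eq_true, decide_eq_true_eq]
      constructor
      · rintro ⟨⟨hA, h1⟩, h2⟩
        exact ⟨hA, h2⟩
      · rintro ⟨hA, h2⟩
        exact ⟨⟨hA, by omega⟩, h2⟩
    have t5 : E.filter (fun q => (decide (q.2 ∈ ps) && decide (q.1 < y.1 + 1)) && decide (s ≤ q.1))
        = E.filter (fun q => (decide (q.2 ∈ ps) && decide (s ≤ q.1)) && decide (q.1 < y.1)) := by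
      apply List.filter_congr
      intro q hq
      rw [Bool.eq_iff_iff]
      simp only [Bool.and_eq_true, decide_eq_true_eq]
      constructor
      · rintro ⟨⟨hk, hc⟩, hge⟩
        refine ⟨⟨hk, hge⟩, ?_⟩
        rcases lt_or_eq_of_le (by omega : q.1 ≤ y.1) with h | h
        · exact h
        · have : q = y := pv_fst_unique E hE q hq y hyE h
          subst this
          exact absurd hk (by intro hk2; have := hps q.2 hk2; omega)
      · rintro ⟨⟨hk, hge⟩, hlt⟩
        exact ⟨⟨hk, by omega⟩, hge⟩
    have hSH : pvSH E ps (y.1 + 1) = E.filter (fun q => decide (q.2 ∈ ps) && decide (y.1 + 1 ≤ q.1)) := rfl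
    rw [t1, t2, pvState, hSH, t3, t4, t5]
    simp [List.append_assoc]

-- ---------- assembling B's level loop against the removal order ----------

theorem pvGroups_getD (priorities : List Int) (v : Int) :
    (pvGroups priorities).getD v []
      = ((pvE priorities).filter (fun q => decide (q.2 = v))).map Prod.fst := by
  rw [pvGroups, pvE]
  exact groups_getD priorities v

theorem pv_last_getD (l : List Int) (v : Int) (h : l.getLast? = some v) :
    PySem.List.pyGetD l (-1) 0 = v := by
  have hne : l ≠ [] := by intro hc; rw [hc] at h; simp at h
  rw [PySem.List.pyGetD_neg_one l 0 hne]
  rw [List.getLast?_eq_some_getLast hne] at h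
  exact Option.some.inj h

theorem pv_idx_filter_ge (E : List (Int × Int)) (p s : Int) :
    ((E.filter (fun q => decide (q.2 = p))).map Prod.fst).filter (fun i => decide (s ≤ i))
      = (E.filter (fun q => decide (q.2 = p) && decide (s ≤ q.1))).map Prod.fst := by
  rw [List.filter_map, List.filter_filter]
  congr 1
  apply List.filter_congr
  intro q hq
  simp [Function.comp, Bool.and_comm]

theorem pv_idx_filter_lt (E : List (Int × Int)) (p s : Int) :
    ((E.filter (fun q => decide (q.2 = p))).map Prod.fst).filter (fun i => decide (i < s))
      = (E.filter (fun q => decide (q.2 = p) && decide (q.1 < s))).map Prod.fst := by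
  rw [List.filter_map, List.filter_filter]
  congr 1
  apply List.filter_congr
  intro q hq
  simp [Function.comp, Bool.and_comm]

theorem pv_state_filter (E : List (Int × Int)) (p : Int) (ps : List Int) (s : Int) :
    (pvState E (p :: ps) s).filter (fun q => decide (q.2 = p))
      = E.filter (fun q => decide (q.2 = p) && decide (s ≤ q.1))
        ++ E.filter (fun q => decide (q.2 = p) && decide (q.1 < s)) := by
  rw [pvState, List.filter_append]
  congr 1
  · rw [pvSH, List.filter_filter]
    apply List.filter_congr
    intro q hq
    rw [Bool.eq_iff_iff]
    simp only [Bool.and_eq_true, decide_eq_true_eq, List.mem_cons]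
    constructor
    · rintro ⟨he, _, hge⟩
      exact ⟨he, hge⟩
    · rintro ⟨he, hge⟩
      exact ⟨he, Or.inl he, hge⟩
  · rw [pvSL, List.filter_filter]
    apply List.filter_congr
    intro q hq
    rw [Bool.eq_iff_iff]
    simp only [Bool.and_eq_true, decide_eq_true_eq, List.mem_cons]
    constructor
    · rintro ⟨he, _, hlt⟩
      exact ⟨he, hlt⟩
    · rintro ⟨he, hlt⟩
      exact ⟨he, Or.inl he, hlt⟩

theorem pv_state_ub (E : List (Int × Int)) (p : Int) (ps : List Int) (s : Int)
    (hps : ∀ v ∈ ps, v < p) :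
    ∀ q ∈ pvState E (p :: ps) s, q.2 ≤ p := by
  intro q hq
  rcases List.mem_append.mp hq with h1 | h1 <;>
  · have := (List.mem_filter.mp h1).2
    simp only [Bool.and_eq_true, decide_eq_true_eq, List.mem_cons] at this
    rcases this.1 with h2 | h2
    · omega
    · have := hps q.2 h2
      omega

theorem levelLoop_eq (priorities : List Int) (location : Int) :
    ∀ (K : List Int), K.Pairwise (fun a b => b < a) →
    ∀ (s rank : Int),
    (∀ v ∈ K, ∃ q ∈ pvE priorities, q.2 = v) →
    (∃ q ∈ pvE priorities, q.1 = location ∧ q.2 ∈ K) →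
    ∃ j : Nat,
      PySem.List.index? (rmOrder (pvState (pvE priorities) K s)) location = some j ∧
      solutionAltLevels (pvGroups priorities) location K rank s = rank + (j : Int) + 1 := by
  intro K
  induction K with
  | nil =>
    intro _ s rank _ hloc
    obtain ⟨q, _, _, hq⟩ := hloc
    simp at hq
  | cons p ps ih =>
    intro hpair s rank hocc hloc
    have hE : List.Pairwise (fun a b : Int × Int => a.1 < b.1) (pvE priorities) :=
      PySem.List.pairwise_lt_enumerate priorities 0
    have hps : ∀ v ∈ ps, v < p := (List.pairwise_cons.mp hpair).1
    have hg : (pvGroups priorities).getD p []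
        = ((pvE priorities).filter (fun q => decide (q.2 = p))).map Prod.fst :=
      pvGroups_getD priorities p
    have hseqB : ((pvGroups priorities).getD p []).filter (fun i => decide (s ≤ i))
          ++ ((pvGroups priorities).getD p []).filter (fun i => decide (i < s))
        = ((pvE priorities).filter (fun q => decide (q.2 = p) && decide (s ≤ q.1))).map Prod.fst
          ++ ((pvE priorities).filter (fun q => decide (q.2 = p) && decide (q.1 < s))).map Prod.fst := by
      rw [hg, pv_idx_filter_ge, pv_idx_filter_lt]
    -- obtain the last-finished index y of this priority level, and the state decomposition
    have hkey : ∃ y : Int × Int, y ∈ pvE priorities ∧ y.2 = p ∧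
        (((pvE priorities).filter (fun q => decide (q.2 = p) && decide (s ≤ q.1))).map Prod.fst
          ++ ((pvE priorities).filter (fun q => decide (q.2 = p) && decide (q.1 < s))).map Prod.fst).getLast? = some y.1 ∧
        ∃ alpha beta,
          pvState (pvE priorities) (p :: ps) s = alpha ++ y :: beta ∧
          (∀ q ∈ beta, q.2 ≠ p) ∧
          beta ++ alpha.filter (fun q => !decide (q.2 = p)) = pvState (pvE priorities) ps (y.1 + 1) := by
      by_cases hlow : (pvE priorities).filter (fun q => decide (q.2 = p) && decide (q.1 < s)) = []
      · -- no process of this priority before position s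
        have hnolow : ∀ q ∈ pvE priorities, q.2 = p → s ≤ q.1 := by
          intro q hq h2
          by_contra hc
          have : q ∈ (pvE priorities).filter (fun q => decide (q.2 = p) && decide (q.1 < s)) :=
            List.mem_filter.mpr ⟨hq, by simp [h2]; omega⟩
          rw [hlow] at this
          simp at this
        obtain ⟨qp, hqpE, hqp2⟩ := hocc p (List.mem_cons_self ..)
        have hge_ne : (pvE priorities).filter (fun q => decide (q.2 = p) && decide (s ≤ q.1)) ≠ [] := by
          intro hc
          have : qp ∈ (pvE priorities).filter (fun q => decide (q.2 = p) && decide (s ≤ q.1)) :=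
            List.mem_filter.mpr ⟨hqpE, by simp [hqp2, hnolow qp hqpE hqp2]⟩
          rw [hc] at this
          simp at this
        obtain ⟨y, hyE, hPy, hlastq, hub⟩ := pv_group_last (pvE priorities) hE _ hge_ne
        have hy2 : y.2 = p := by simpa using (Bool.and_eq_true .. ▸ hPy).1 |> decide_eq_true_eq.mp
        have hys : s ≤ y.1 := by
          have := (Bool.and_eq_true .. ▸ hPy).2
          simpa using this
        have hlast : ∀ q ∈ pvE priorities, q.2 = p → q.1 ≤ y.1 := by
          intro q hq h2
          exact hub q hq (by simp [h2, hnolow q hq h2])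
        refine ⟨y, hyE, hy2, ?_, caseB_decomp (pvE priorities) hE p ps hps s y hyE hy2 hys hnolow hlast⟩
        rw [hlow]
        simp only [List.map_nil, List.append_nil]
        rw [List.getLast?_map, hlastq]
        rfl
      · obtain ⟨y, hyE, hPy, hlastq, hub⟩ := pv_group_last (pvE priorities) hE _ hlow
        have hy2 : y.2 = p := by simpa using (Bool.and_eq_true .. ▸ hPy).1 |> decide_eq_true_eq.mp
        have hys : y.1 < s := by
          have := (Bool.and_eq_true .. ▸ hPy).2
          simpa using this
        have hlast : ∀ q ∈ pvE priorities, q.2 = p → q.1 < s → q.1 ≤ y.1 := by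
          intro q hq h2 h3
          exact hub q hq (by simp [h2]; omega)
        refine ⟨y, hyE, hy2, ?_, caseA_decomp (pvE priorities) hE p ps hps s y hyE hy2 hys hlast⟩
        rw [List.getLast?_append, List.getLast?_map, hlastq]
        rfl
    obtain ⟨y, hyE, hy2, hlastval, alpha, beta, hdec, hbeta, htail⟩ := hkey
    -- the removal order of the state: this whole level first, then the next state
    have hm : pvMax ((alpha ++ y :: beta).map Prod.snd) = p := by
      apply pvMax_snd_eq
      · exact ⟨y, by simp, hy2⟩
      · intro q hq
        rw [← hdec] at hq
        exact pv_state_ub (pvE priorities) p ps s hps q hq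
    have hrm : rmOrder (pvState (pvE priorities) (p :: ps) s)
        = (((pvGroups priorities).getD p []).filter (fun i => decide (s ≤ i))
            ++ ((pvGroups priorities).getD p []).filter (fun i => decide (i < s)))
          ++ rmOrder (pvState (pvE priorities) ps (y.1 + 1)) := by
      rw [hdec, levelStep (alpha.countP (fun q => decide (q.2 = p))) alpha y beta p rfl hm hy2 hbeta,
        htail, ← hdec, pv_state_filter, List.map_append, hseqB]
    set seqB := ((pvGroups priorities).getD p []).filter (fun i => decide (s ≤ i))
        ++ ((pvGroups priorities).getD p []).filter (fun i => decide (i < s)) with hseqdef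
    have hunfold : solutionAltLevels (pvGroups priorities) location (p :: ps) rank s
        = (match solutionAltInner seqB location rank with
           | Sum.inl r => r
           | Sum.inr rank' => solutionAltLevels (pvGroups priorities) location ps rank'
               (PySem.List.pyGetD seqB (-1) 0 + 1)) := rfl
    have hlastval' : PySem.List.pyGetD seqB (-1) 0 = y.1 := by
      apply pv_last_getD
      rw [hseqB]
      exact hlastval
    by_cases hmem : location ∈ seqB
    · obtain ⟨j, hj1, hj2⟩ := inner_found seqB location rank hmem
      refine ⟨j, ?_, ?_⟩
      · rw [hrm, PySem.List.index?_append_of_mem _ hmem]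
        exact hj1
      · rw [hunfold, hj2]
    · have hinner := inner_notfound seqB location rank hmem
      have hocc' : ∀ v ∈ ps, ∃ q ∈ pvE priorities, q.2 = v := by
        intro v hv
        exact hocc v (List.mem_cons_of_mem _ hv)
      have hloc' : ∃ q ∈ pvE priorities, q.1 = location ∧ q.2 ∈ ps := by
        obtain ⟨q, hqE, hq1, hqK⟩ := hloc
        rcases List.mem_cons.mp hqK with h2 | h2
        · exfalso
          apply hmem
          rw [hseqB]
          by_cases hc : s ≤ q.1
          · apply List.mem_append_left
            exact List.mem_map.mpr ⟨q, List.mem_filter.mpr ⟨hqE, by simp [h2, hc]⟩, hq1⟩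
          · apply List.mem_append_right
            exact List.mem_map.mpr ⟨q, List.mem_filter.mpr ⟨hqE, by simp [h2]; omega⟩, hq1⟩
        · exact ⟨q, hqE, hq1, h2⟩
      obtain ⟨j', hj1', hj2'⟩ := ih (List.pairwise_cons.mp hpair).2 (y.1 + 1)
        (rank + (seqB.length : Int)) hocc' hloc'
      refine ⟨j' + seqB.length, ?_, ?_⟩
      · rw [hrm, pv_index?_append_right seqB _ location hmem, hj1']
        rfl
      · rw [hunfold, hinner]
        show solutionAltLevels (pvGroups priorities) location ps (rank + (seqB.length : Int))
            (PySem.List.pyGetD seqB (-1) 0 + 1) = rank + ((j' + seqB.length : Nat) : Int) + 1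
        rw [hlastval', hj2']
        push_cast
        ring

-- ---------- final assembly ----------

theorem pvGroups_keys (priorities : List Int) :
    (pvGroups priorities).keys = PySem.Set.ofList priorities := by
  rw [pvGroups]
  exact groups_keys priorities

theorem pvE_fst_nonneg (priorities : List Int) : ∀ q ∈ pvE priorities, 0 ≤ q.1 := by
  intro q hq
  obtain ⟨k, hk, he⟩ := (PySem.List.mem_enumerate_iff priorities 0 q).mp hq
  rw [he]
  simp

-- ===== VERDICT (by name: the statement is the Claim_ definition above) =====
theorem solution_spec : Claim_equal_solution := by
  unfold Claim_equal_solution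
  intro priorities location _ hpre
  obtain ⟨h0, hlen⟩ := hpre
  unfold Spec_solution
  rw [solution_eq_rm]
  have hAlt : solution_alt priorities location
      = solutionAltLevels (pvGroups priorities) location
          (PySem.List.sorted (pvGroups priorities).keys (fun x => x) true) 0 0 := rfl
  set K0 := PySem.List.sorted (pvGroups priorities).keys (fun x => x) true with hK0
  have hmemK0 : ∀ v, v ∈ K0 ↔ v ∈ priorities := by
    intro v
    rw [hK0, (PySem.List.sorted_perm (pvGroups priorities).keys (fun x => x) true).mem_iff,
      pvGroups_keys]
    exact PySem.Set.mem_ofList priorities v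
  have hpair : K0.Pairwise (fun a b => b < a) := by
    have h1 := PySem.List.sorted_pairwise_rev (pvGroups priorities).keys (fun x => x)
    have hnd : K0.Nodup := by
      rw [hK0]
      rw [(PySem.List.sorted_perm (pvGroups priorities).keys (fun x => x) true).nodup_iff,
        pvGroups_keys]
      exact PySem.Set.nodup_ofList priorities
    exact (List.Pairwise.and (hK0 ▸ h1) hnd).imp
      (fun h => lt_of_le_of_ne h.1 (fun he => h.2 he.symm))
  have hcover : ∀ q ∈ pvE priorities, q.2 ∈ K0 := by
    intro q hq
    rw [hmemK0]
    rw [← PySem.List.map_snd_enumerate priorities 0]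
    exact List.mem_map_of_mem hq
  have hstate0 : pvState (pvE priorities) K0 0 = pvE priorities := by
    rw [pvState]
    have h1 : pvSH (pvE priorities) K0 0 = pvE priorities := by
      rw [pvSH]
      apply List.filter_eq_self.mpr
      intro q hq
      simp only [Bool.and_eq_true, decide_eq_true_eq]
      exact ⟨hcover q hq, pvE_fst_nonneg priorities q hq⟩
    have h2 : pvSL (pvE priorities) K0 0 = [] := by
      rw [pvSL]
      apply List.filter_eq_nil_iff.mpr
      intro q hq
      have := pvE_fst_nonneg priorities q hq
      simp
      omega
    rw [h1, h2, List.append_nil]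
  have hocc : ∀ v ∈ K0, ∃ q ∈ pvE priorities, q.2 = v := by
    intro v hv
    have hv' : v ∈ priorities := (hmemK0 v).mp hv
    rw [← PySem.List.map_snd_enumerate priorities 0] at hv'
    obtain ⟨q, hq, he⟩ := List.mem_map.mp hv'
    exact ⟨q, hq, he⟩
  have hloc : ∃ q ∈ pvE priorities, q.1 = location ∧ q.2 ∈ K0 := by
    have hlt : location.toNat < priorities.length := by omega
    refine ⟨((0 : Int) + (location.toNat : Int), priorities[location.toNat]), ?_, ?_, ?_⟩
    · exact (PySem.List.mem_enumerate_iff priorities 0 _).mpr ⟨location.toNat, hlt, rfl⟩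
    · simp
      omega
    · rw [hmemK0]
      exact priorities.getElem_mem _
  obtain ⟨j, hj1, hj2⟩ := levelLoop_eq priorities location K0 hpair 0 0 hocc hloc
  rw [hstate0] at hj1
  simp only [pvE] at hj1
  rw [hj1]
  show (j : Int) + 1 = solution_alt priorities location
  rw [hAlt, hj2]
  omega
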